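-- pv_equiv track=rewrite | github.com/YenShin1891/ml-iam | src/trainers/mlf_trainer.py | sanitize_feature_names
-- ===== SOURCE A (Python) =====
-- from typing import List, Tuple
--
-- def sanitize_feature_names(features: List[str]) -> Tuple[dict, dict]:
--     """
--     Simple sanitization for MLForecast compatibility.
--     Handles |, /, and space as _ characters, avoiding double underscores.
--     """
--     original_to_sanitized = {}
--     sanitized_to_original = {}
--
--     for feature in features:
--         # Replace problematic characters with single underscore
--         sanitized = feature.replace('|', '_').replace(' ', '_').replace('/', '_')
--
--         # Remove consecutive underscores to avoid __ which MLForecast might interpret specially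
--         while '__' in sanitized:
--             sanitized = sanitized.replace('__', '_')
--
--         # Remove leading/trailing underscores
--         sanitized = sanitized.strip('_')
--
--         original_to_sanitized[feature] = sanitized
--         sanitized_to_original[sanitized] = feature
--
--     return original_to_sanitized, sanitized_to_original
-- ===== SOURCE B (Python) =====
-- from typing import List, Tuple
--
-- def sanitize_feature_names(features: List[str]) -> Tuple[dict, dict]:
--     """
--     Single-pass sanitization: scan each feature once, turning runs of
--     '|', ' ', '/' and '_' into a single '_' between words (so leading and
--     trailing separators vanish by construction), instead of chained
--     replace() calls plus a collapse-while-loop plus strip().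
--     """
--     original_to_sanitized = {}
--     sanitized_to_original = {}
--
--     for feature in features:
--         out = []
--         pending = False  # a separator run is waiting to be emitted
--         for c in feature:
--             if c in '| /_':
--                 pending = True
--             else:
--                 if pending and out:
--                     out.append('_')
--                 out.append(c)
--                 pending = False
--         sanitized = ''.join(out)
--
--         original_to_sanitized[feature] = sanitized
--         sanitized_to_original[sanitized] = feature
--
--     return original_to_sanitized, sanitized_to_original
-- ===== Notes on version B (the rewrite author's own statement) =====
-- stated objective: alternative
-- what changed: Each feature is sanitized in one character scan with a pending-separator flag (runs of '|', ' ', '/', '_' collapse inline and leading/trailing separators are never emitted) instead of three chained replace() passes, a while-loop repeatedly replacing '__' with '_', and a final strip('_').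
import Mathlib
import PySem

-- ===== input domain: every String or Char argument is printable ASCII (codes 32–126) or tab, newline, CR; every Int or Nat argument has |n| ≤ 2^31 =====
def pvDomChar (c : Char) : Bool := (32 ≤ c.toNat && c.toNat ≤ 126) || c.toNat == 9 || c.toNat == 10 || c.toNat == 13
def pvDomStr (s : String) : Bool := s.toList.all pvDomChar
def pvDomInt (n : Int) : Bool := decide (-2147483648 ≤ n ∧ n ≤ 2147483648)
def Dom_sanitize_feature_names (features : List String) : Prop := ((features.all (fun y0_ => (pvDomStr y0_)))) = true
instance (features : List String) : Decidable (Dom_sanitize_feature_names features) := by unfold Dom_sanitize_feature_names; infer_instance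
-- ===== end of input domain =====

-- ===== PORT A =====
-- B replaces A's chained replace() + '__'-collapse loop + strip('_') by a single
-- character scan per feature; equivalence of the two dict-building loops is proved below.

-- `rep` is one pass of Python's  s.replace('__', '_')  (specialised to that pattern);
-- the lemmas below it justify termination of the while-loop port `loopA`.
def pvRep : List Char → List Char
  | [] => []
  | [c] => [c]
  | a :: b :: t => if a = '_' ∧ b = '_' then '_' :: pvRep t else a :: pvRep (b :: t)

theorem pvGo_eq_rep : ∀ (fuel : Nat) (l acc : List Char), l.length ≤ fuel →
    PySem.Chars.replace.go ['_','_'] ['_'] fuel l acc = acc.reverse ++ pvRep l := by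
  intro fuel
  induction fuel with
  | zero =>
    intro l acc h
    have hl : l = [] := List.eq_nil_of_length_eq_zero (Nat.le_zero.mp h)
    subst hl
    rw [PySem.Chars.replace.go]; simp [pvRep]
  | succ n ih =>
    intro l acc h
    match l with
    | [] => rw [PySem.Chars.replace.go] <;> simp [pvRep]
    | [c] =>
      rw [PySem.Chars.replace.go]
      have hp : (['_','_'].isPrefixOf [c]) = false := by simp [List.isPrefixOf]
      rw [hp]
      simp only [Bool.false_eq_true, if_false]
      rw [ih [] (c :: acc) (by simp)]
      simp [pvRep]
    | a :: b :: t =>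
      rw [PySem.Chars.replace.go]
      by_cases hab : a = '_' ∧ b = '_'
      · obtain ⟨ha, hb⟩ := hab
        subst ha; subst hb
        have hp : (['_','_'].isPrefixOf ('_' :: '_' :: t)) = true := by
          simp [List.isPrefixOf]
        rw [hp]
        simp only [if_true, show (['_','_'] : List Char).length = 2 from rfl,
          List.drop_succ_cons, List.drop_zero, List.reverse_singleton, List.singleton_append]
        rw [ih t ('_' :: acc) (by simp at h ⊢; omega)]
        simp [pvRep]
      · have hp : (['_','_'].isPrefixOf (a :: b :: t)) = false := by
          simp [List.isPrefixOf]
          intro ha hb; exact hab ⟨ha.symm, hb.symm⟩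
        rw [hp]
        simp only [Bool.false_eq_true, if_false]
        rw [ih (b :: t) (a :: acc) (by simp at h ⊢; omega)]
        simp [pvRep, hab]

theorem pvReplace_eq_rep (l : List Char) :
    PySem.Chars.replace l ['_','_'] ['_'] = pvRep l := by
  rw [PySem.Chars.replace]
  simp only [List.isEmpty_cons, Bool.false_eq_true, if_false]
  rw [pvGo_eq_rep l.length l [] le_rfl]
  simp

theorem pvRep_length_le (l : List Char) : (pvRep l).length ≤ l.length := by
  induction l using pvRep.induct with
  | case1 => simp [pvRep]
  | case2 c => simp [pvRep]
  | case3 a b t h ih => simp only [pvRep, if_pos h]; simp at ih ⊢; omega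
  | case4 a b t h ih => simp only [pvRep, if_neg h]; simp at ih ⊢; omega

theorem pvRep_length_lt (l : List Char) (h : ['_','_'] <:+: l) :
    (pvRep l).length < l.length := by
  induction l using pvRep.induct with
  | case1 => exact absurd h.length_le (by simp)
  | case2 c => exact absurd h.length_le (by simp)
  | case3 a b t hab ih =>
    have := pvRep_length_le t
    simp only [pvRep, if_pos hab]
    simp at this ⊢; omega
  | case4 a b t hab ih =>
    have hbt : ['_','_'] <:+: b :: t := by
      rcases List.infix_cons_iff.mp h with hpre | hinf
      · rw [List.cons_prefix_cons] at hpre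
        rw [List.cons_prefix_cons] at hpre
        exact absurd ⟨hpre.1.symm, hpre.2.1.symm⟩ hab
      · exact hinf
    have := ih hbt
    simp only [pvRep, if_neg hab]
    simp at this ⊢; omega

-- the while-loop  `while '__' in s: s = s.replace('__', '_')`  on code points
def loopA (s : List Char) : List Char :=
  if h : PySem.Chars.isIn ['_','_'] s then
    loopA (PySem.Chars.replace s ['_','_'] ['_'])
  else s
termination_by s.length
decreasing_by
  rw [pvReplace_eq_rep]
  exact pvRep_length_lt s ((PySem.Chars.isIn_iff_infix _ _).mp h)

def sanitize_feature_names (features : List String) :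
    (List (String × String)) × (List (String × String)) :=
  let p := features.foldl
    (fun (acc : PySem.Dict String String × PySem.Dict String String) feature =>
      let sanitized := PySem.Str.replace (PySem.Str.replace (PySem.Str.replace feature "|" "_") " " "_") "/" "_"
      let sanitized := String.ofList (loopA sanitized.toList)   -- the while-loop, on code points
      let sanitized := PySem.Str.stripChars sanitized "_"
      (acc.1.insert feature sanitized, acc.2.insert sanitized feature))
    (PySem.Dict.empty, PySem.Dict.empty)
  (p.1.items, p.2.items)

-- ===== PORT B =====
-- the inner  `for c in feature`  loop of Source B: state (out, pending)
def goB : List Char → List Char → Bool → List Char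
  | [], out, _ => out
  | c :: t, out, pend =>
    if c == '|' || c == ' ' || c == '/' || c == '_' then goB t out true
    else goB t ((if pend && !out.isEmpty then out ++ ['_'] else out) ++ [c]) false

def sanitize_feature_names_alt (features : List String) :
    (List (String × String)) × (List (String × String)) :=
  let p := features.foldl
    (fun (acc : PySem.Dict String String × PySem.Dict String String) feature =>
      let sanitized := String.ofList (goB feature.toList [] false)
      (acc.1.insert feature sanitized, acc.2.insert sanitized feature))
    (PySem.Dict.empty, PySem.Dict.empty)
  (p.1.items, p.2.items)

-- ===== PRECONDITION & SPEC =====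
def Spec_sanitize_feature_names (features : List String) (out : (List (String × String)) × (List (String × String))) : Prop := out = sanitize_feature_names_alt features
instance (features : List String) (out : (List (String × String)) × (List (String × String))) : Decidable (Spec_sanitize_feature_names features out) := by unfold Spec_sanitize_feature_names; infer_instance

-- ===== CLAIM (what is proved, stated in full; the proofs are below) =====
def Claim_equal_sanitize_feature_names : Prop := ∀ (features : List String), Dom_sanitize_feature_names features → Spec_sanitize_feature_names features (sanitize_feature_names features)

-- ===== LEMMAS AND PROOFS =====

-- output emitted by B's scan once `out` is nonempty / from scratch
def pvE : List Char → Bool → List Char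
  | [], _ => []
  | c :: t, pend => if c = '_' then pvE t true else (if pend then ['_', c] else [c]) ++ pvE t false

def pvF : List Char → List Char
  | [] => []
  | c :: t => if c = '_' then pvF t else c :: pvE t false

-- the collapsed form: runs of '_' reduced to a single '_'
def pvCol : List Char → List Char
  | [] => []
  | [c] => [c]
  | a :: b :: t => if a = '_' ∧ b = '_' then pvCol (b :: t) else a :: pvCol (b :: t)

theorem pvCol_cons_cons (a b : Char) (t : List Char) :
    pvCol (a :: b :: t) = if a = '_' ∧ b = '_' then pvCol (b :: t) else a :: pvCol (b :: t) := by
  simp [pvCol]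

theorem pvCol_cons_ne (c : Char) (t : List Char) (hc : c ≠ '_') :
    pvCol (c :: t) = c :: pvCol t := by
  cases t with
  | nil => simp [pvCol]
  | cons d t' => rw [pvCol_cons_cons, if_neg (fun hh => hc hh.1)]

theorem pvQ : ∀ (l : List Char) (a : Char), pvCol (a :: pvRep l) = pvCol (a :: l)
  | [], a => by simp [pvRep]
  | [c], a => by simp [pvRep]
  | b :: c :: t, a => by
    by_cases h : b = '_' ∧ c = '_'
    · obtain ⟨hb, hc⟩ := h; subst hb; subst hc
      simp only [pvRep, and_self, if_true]
      by_cases ha : a = '_'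
      · subst ha
        rw [show pvCol ('_' :: '_' :: pvRep t) = pvCol ('_' :: pvRep t) from by simp [pvCol_cons_cons]]
        rw [show pvCol ('_' :: '_' :: '_' :: t) = pvCol ('_' :: '_' :: t) from by simp [pvCol_cons_cons]]
        rw [show pvCol ('_' :: '_' :: t) = pvCol ('_' :: t) from by simp [pvCol_cons_cons]]
        exact pvQ t '_'
      · rw [show pvCol (a :: '_' :: pvRep t) = a :: pvCol ('_' :: pvRep t) from by
          rw [pvCol_cons_cons, if_neg (fun hh => ha hh.1)]]
        rw [show pvCol (a :: '_' :: '_' :: t) = a :: pvCol ('_' :: '_' :: t) from by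
          rw [pvCol_cons_cons, if_neg (fun hh => ha hh.1)]]
        rw [show pvCol ('_' :: '_' :: t) = pvCol ('_' :: t) from by simp [pvCol_cons_cons]]
        rw [pvQ t '_']
    · simp only [pvRep, if_neg h]
      rw [pvCol_cons_cons, pvCol_cons_cons (t := c :: t)]
      by_cases hab : a = '_' ∧ b = '_'
      · rw [if_pos hab, if_pos hab]; exact pvQ (c :: t) b
      · rw [if_neg hab, if_neg hab, pvQ (c :: t) b]
termination_by l a => l.length

theorem pvCol_rep (l : List Char) : pvCol (pvRep l) = pvCol l := by
  match l with
  | [] => rfl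
  | [c] => rfl
  | a :: b :: t =>
    by_cases h : a = '_' ∧ b = '_'
    · obtain ⟨ha, hb⟩ := h; subst ha; subst hb
      simp only [pvRep, and_self, if_true]
      rw [pvQ t '_']
      rw [show pvCol ('_' :: '_' :: t) = pvCol ('_' :: t) from by simp [pvCol_cons_cons]]
    · simp only [pvRep, if_neg h]
      exact pvQ (b :: t) a

theorem pvCol_eq_self (l : List Char) (h : ¬ ['_','_'] <:+: l) : pvCol l = l := by
  induction l using pvCol.induct with
  | case1 => rfl
  | case2 c => rfl
  | case3 a b t hab ih =>
    obtain ⟨ha, hb⟩ := hab; subst ha; subst hb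
    exact absurd (List.infix_cons_iff.mpr (Or.inl (by simp))) h
  | case4 a b t hab ih =>
    have hbt : ¬ ['_','_'] <:+: b :: t := fun hin => h (List.infix_cons_iff.mpr (Or.inr hin))
    rw [pvCol_cons_cons, if_neg hab, ih hbt]

theorem pvLoopA_eq_col (s : List Char) : loopA s = pvCol s := by
  induction s using loopA.induct with
  | case1 s h ih =>
    rw [loopA, dif_pos h, ih, pvReplace_eq_rep, pvCol_rep]
  | case2 s h =>
    rw [loopA, dif_neg h]
    exact (pvCol_eq_self s (fun hin => h ((PySem.Chars.isIn_iff_infix _ _).mpr hin))).symm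

theorem pvGoS : ∀ (fuel : Nat) (a b : Char) (l acc : List Char), l.length ≤ fuel →
    PySem.Chars.replace.go [a] [b] fuel l acc
      = acc.reverse ++ l.map (fun c => if c = a then b else c) := by
  intro fuel
  induction fuel with
  | zero =>
    intro a b l acc h
    have hl : l = [] := List.eq_nil_of_length_eq_zero (Nat.le_zero.mp h)
    subst hl
    rw [PySem.Chars.replace.go] <;> simp
  | succ n ih =>
    intro a b l acc h
    match l with
    | [] => rw [PySem.Chars.replace.go] <;> simp
    | c :: t =>
      rw [PySem.Chars.replace.go]
      by_cases hac : a = c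
      · subst hac
        have hp : ([a].isPrefixOf (a :: t)) = true := by simp [List.isPrefixOf]
        rw [hp]
        simp only [if_true, show ([a] : List Char).length = 1 from rfl,
          List.drop_succ_cons, List.drop_zero, List.reverse_singleton, List.singleton_append]
        rw [ih a b t (b :: acc) (by simp at h ⊢; omega)]
        simp
      · have hp : ([a].isPrefixOf (c :: t)) = false := by
          simp [List.isPrefixOf]; exact hac
        rw [hp]
        simp only [Bool.false_eq_true, if_false]
        rw [ih a b t (c :: acc) (by simp at h ⊢; omega)]
        have hcc : (if c = a then b else c) = c := if_neg (fun hh => hac hh.symm)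
        simp [hcc]

theorem pvReplaceS (l : List Char) (a b : Char) :
    PySem.Chars.replace l [a] [b] = l.map (fun c => if c = a then b else c) := by
  rw [PySem.Chars.replace]
  simp only [List.isEmpty_cons, Bool.false_eq_true, if_false]
  rw [pvGoS l.length a b l [] le_rfl]
  simp

set_option maxHeartbeats 1000000 in
theorem pvMap_eq (f : String) :
    (PySem.Str.replace (PySem.Str.replace (PySem.Str.replace f "|" "_") " " "_") "/" "_").toList
      = f.toList.map (fun c => if c = '|' ∨ c = ' ' ∨ c = '/' then '_' else c) := by
  simp only [PySem.Str.replace]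
  have e1 : ("|" : String).toList = ['|'] := rfl
  have e2 : (" " : String).toList = [' '] := rfl
  have e3 : ("/" : String).toList = ['/'] := rfl
  have e4 : ("_" : String).toList = ['_'] := rfl
  simp only [e1, e2, e3, e4, String.toList_ofList, pvReplaceS, List.map_map]
  apply List.map_congr_left
  intro c _
  by_cases h1 : c = '|' <;> by_cases h2 : c = ' ' <;> by_cases h3 : c = '/' <;>
    simp [Function.comp, h1, h2, h3]

-- B-side spec machinery: pvGoB2 is goB on the mapped characters
def pvGoB2 : List Char → List Char → Bool → List Char
  | [], out, _ => out
  | c :: t, out, pend =>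
    if c = '_' then pvGoB2 t out true
    else pvGoB2 t ((if pend ∧ out ≠ [] then out ++ ['_'] else out) ++ [c]) false

theorem pvGoB_eq_goB2 (l : List Char) : ∀ (out : List Char) (pend : Bool),
    goB l out pend
      = pvGoB2 (l.map (fun c => if c = '|' ∨ c = ' ' ∨ c = '/' then '_' else c)) out pend := by
  induction l with
  | nil => intro out pend; rfl
  | cons c t ih =>
    intro out pend
    by_cases hc : c = '|' ∨ c = ' ' ∨ c = '/' ∨ c = '_'
    · have hb : (c == '|' || c == ' ' || c == '/' || c == '_') = true := by
        rcases hc with h | h | h | h <;> simp [h]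
      have hstep : (if c = '|' ∨ c = ' ' ∨ c = '/' then '_' else c) = '_' := by
        rcases hc with h | h | h | h <;> simp [h]
      simp only [goB, hb, if_true, List.map_cons, hstep, pvGoB2, if_pos rfl]
      exact ih out true
    · push_neg at hc
      obtain ⟨h1, h2, h3, h4⟩ := hc
      have hb : (c == '|' || c == ' ' || c == '/' || c == '_') = false := by
        simp [h1, h2, h3, h4]
      have hstep : (if c = '|' ∨ c = ' ' ∨ c = '/' then '_' else c) = c := by
        simp [h1, h2, h3]
      simp only [goB, hb, Bool.false_eq_true, if_false, List.map_cons, hstep, pvGoB2,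
        if_neg h4]
      rw [ih]
      congr 2
      by_cases hp : pend <;> by_cases ho : out = [] <;>
        simp [hp, ho]

theorem pvGoB2_out : ∀ (m out : List Char) (pend : Bool), out ≠ [] →
    pvGoB2 m out pend = out ++ pvE m pend := by
  intro m
  induction m with
  | nil => intro out pend h; simp [pvGoB2, pvE]
  | cons c t ih =>
    intro out pend h
    by_cases hc : c = '_'
    · subst hc
      simp only [pvGoB2, if_pos rfl, pvE]
      exact ih out true h
    · simp only [pvGoB2, if_neg hc, pvE, if_neg hc]
      rw [ih _ false (by simp)]
      by_cases hp : pend <;> simp [hp, h]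

theorem pvGoB2_nil : ∀ (m : List Char) (pend : Bool), pvGoB2 m [] pend = pvF m := by
  intro m
  induction m with
  | nil => intro pend; rfl
  | cons c t ih =>
    intro pend
    by_cases hc : c = '_'
    · subst hc
      simp only [pvGoB2, if_pos rfl, pvF, if_pos rfl]
      exact ih true
    · simp only [pvGoB2, if_neg hc, pvF, if_neg hc]
      have : (if pend ∧ ([] : List Char) ≠ [] then ([] : List Char) ++ ['_'] else []) ++ [c] = [c] := by simp
      rw [this, pvGoB2_out t [c] false (by simp)]
      rfl

-- the '_'-test and right strip used by stripChars with chars = "_"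
def pvU : Char → Bool := fun c => c == '_'

def pvRstrip (X : List Char) : List Char := (List.dropWhile pvU X.reverse).reverse

theorem pvStripChars_eq (s : List Char) :
    PySem.Chars.stripChars s ['_'] = pvRstrip (List.dropWhile pvU s) := by
  have hfe : (fun c : Char => List.contains ['_'] c) = pvU := by
    funext c; by_cases h : c = '_' <;> simp [pvU, h]
  simp only [PySem.Chars.stripChars, hfe, pvRstrip]

theorem pvDW_col (m : List Char) :
    List.dropWhile pvU (pvCol m) = pvCol (List.dropWhile pvU m) := by
  induction m using pvCol.induct with
  | case1 => rfl
  | case2 c =>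
    by_cases hc : c = '_' <;> simp [pvCol, pvU, hc, List.dropWhile_cons]
  | case3 a b t hab ih =>
    obtain ⟨ha, hb⟩ := hab; subst ha; subst hb
    rw [pvCol_cons_cons, if_pos ⟨rfl, rfl⟩, ih]
    simp [pvU, List.dropWhile_cons]
  | case4 a b t hab ih =>
    rw [pvCol_cons_cons, if_neg hab]
    by_cases ha : a = '_'
    · subst ha
      have hb : b ≠ '_' := fun hh => hab ⟨rfl, hh⟩
      rw [show List.dropWhile pvU ('_' :: pvCol (b :: t)) = List.dropWhile pvU (pvCol (b :: t)) from by
        simp [pvU, List.dropWhile_cons]]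
      rw [ih]
      simp [pvU, List.dropWhile_cons, hb]
    · simp [pvU, List.dropWhile_cons, ha]
      rw [pvCol_cons_ne a (b :: t) ha]

theorem pvRstrip_cons_ne (c : Char) (X : List Char) (hc : c ≠ '_') :
    pvRstrip (c :: X) = c :: pvRstrip X := by
  simp only [pvRstrip, List.reverse_cons, List.dropWhile_append]
  split_ifs with h
  · rw [List.isEmpty_iff] at h
    simp [h, List.dropWhile_cons, pvU, hc]
  · simp

theorem pvRstrip_cons_of_ne_nil (h : Char) (X : List Char) (hX : pvRstrip X ≠ []) :
    pvRstrip (h :: X) = h :: pvRstrip X := by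
  have h2 : ¬ (List.dropWhile pvU X.reverse).isEmpty = true := by
    rw [List.isEmpty_iff]
    intro hh
    exact hX (by simp [pvRstrip, hh])
  simp only [pvRstrip, List.reverse_cons, List.dropWhile_append]
  rw [if_neg h2]
  simp

theorem pvL3 : ∀ (t : List Char),
    pvRstrip (pvCol t) = pvE t false ∧ pvRstrip (pvCol ('_' :: t)) = pvE t true
  | [] => ⟨by simp [pvCol, pvE, pvRstrip],
           by simp [pvCol, pvE, pvRstrip, pvU, List.dropWhile_cons]⟩
  | c :: t => by
    by_cases hc : c = '_'
    · subst hc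
      obtain ⟨-, h3⟩ := pvL3 t
      constructor
      · simpa [pvE] using h3
      · rw [show pvCol ('_' :: '_' :: t) = pvCol ('_' :: t) from by simp [pvCol_cons_cons]]
        simpa [pvE] using h3
    · obtain ⟨h3, -⟩ := pvL3 t
      constructor
      · rw [pvCol_cons_ne c t hc, pvRstrip_cons_ne c _ hc, h3]
        simp [pvE, hc]
      · rw [pvCol_cons_cons, if_neg (fun hh => hc hh.2), pvCol_cons_ne c t hc]
        rw [pvRstrip_cons_of_ne_nil _ _ (by rw [pvRstrip_cons_ne c _ hc]; simp)]
        rw [pvRstrip_cons_ne c _ hc, h3]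
        simp [pvE, hc]

theorem pvS' (m : List Char) : pvRstrip (pvCol (List.dropWhile pvU m)) = pvF m := by
  induction m with
  | nil => simp [pvCol, pvF, pvRstrip]
  | cons c t ih =>
    by_cases hc : c = '_'
    · subst hc
      rw [show List.dropWhile pvU ('_' :: t) = List.dropWhile pvU t from by simp [pvU, List.dropWhile_cons]]
      rw [ih]
      simp [pvF]
    · rw [show List.dropWhile pvU (c :: t) = c :: t from by simp [pvU, List.dropWhile_cons, hc]]
      rw [pvCol_cons_ne c t hc, pvRstrip_cons_ne c _ hc]
      rw [(pvL3 t).1]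
      simp [pvF, hc]

theorem pvStrip_col (m : List Char) :
    PySem.Chars.stripChars (pvCol m) ['_'] = pvF m := by
  rw [pvStripChars_eq, pvDW_col, pvS']

theorem pvGoB_eq_F (l : List Char) :
    goB l [] false = pvF (l.map (fun c => if c = '|' ∨ c = ' ' ∨ c = '/' then '_' else c)) := by
  rw [pvGoB_eq_goB2, pvGoB2_nil]

theorem pvSan_eq (feature : String) :
    PySem.Str.stripChars (String.ofList (loopA (PySem.Str.replace (PySem.Str.replace (PySem.Str.replace feature "|" "_") " " "_") "/" "_").toList)) "_"
      = String.ofList (goB feature.toList [] false) := by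
  simp only [PySem.Str.stripChars]
  apply congrArg
  have e4 : ("_" : String).toList = ['_'] := rfl
  rw [e4, String.toList_ofList, pvMap_eq, pvLoopA_eq_col, pvStrip_col, pvGoB_eq_F]

-- ===== VERDICT (by name: the statement is the Claim_ definition above) =====
theorem sanitize_feature_names_spec : Claim_equal_sanitize_feature_names := by
  intro features _
  unfold Spec_sanitize_feature_names sanitize_feature_names sanitize_feature_names_alt
  simp only [pvSan_eq]
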